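-- pv_equiv track=rewrite | github.com/norikinishida/CoreferenceResolution | src/preprocessing/prepare_craft.py | get_sentence_boundaries
-- ===== SOURCE A (Python) =====
-- def get_sentence_boundaries(sentences_conll):
--     sentence_boundaries = []
--     begin_i = end_i = 0
--     for sent_conll in sentences_conll:
--         n_tokens = len(sent_conll)
--         end_i = begin_i + n_tokens - 1
--         sentence_boundaries.append((begin_i, end_i))
--         begin_i = end_i + 1
--     return sentence_boundaries
-- ===== SOURCE B (Python) =====
-- def get_sentence_boundaries(sentences_conll):
--     # Recursive decomposition: boundaries of the tail computed relative to 0,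
--     # then shifted right by the head sentence's length.
--     if not sentences_conll:
--         return []
--     n = len(sentences_conll[0])
--     rest = get_sentence_boundaries(sentences_conll[1:])
--     return [(0, n - 1)] + [(b + n, e + n) for (b, e) in rest]
-- ===== Notes on version B (the rewrite author's own statement) =====
-- stated objective: alternative
-- what changed: Replaces A's single loop threading begin_i/end_i offsets by structural recursion with no offset state at all: the tail's boundaries are computed relative to 0 and every pair is then shifted by the head sentence's length.
import Mathlib
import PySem

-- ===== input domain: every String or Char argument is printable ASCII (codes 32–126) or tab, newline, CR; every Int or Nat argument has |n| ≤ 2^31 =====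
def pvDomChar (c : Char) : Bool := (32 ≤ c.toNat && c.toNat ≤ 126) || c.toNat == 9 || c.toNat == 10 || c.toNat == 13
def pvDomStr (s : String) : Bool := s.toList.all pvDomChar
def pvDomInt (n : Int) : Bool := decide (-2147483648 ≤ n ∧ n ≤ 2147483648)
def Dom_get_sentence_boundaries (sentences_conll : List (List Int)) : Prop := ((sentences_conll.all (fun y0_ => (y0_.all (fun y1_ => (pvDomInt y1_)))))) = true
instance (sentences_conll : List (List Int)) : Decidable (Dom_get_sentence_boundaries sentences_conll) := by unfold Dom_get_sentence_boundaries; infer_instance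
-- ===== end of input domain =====

-- B replaces A's offset-threading loop by structural recursion with no offset state: the tail's boundaries are computed relative to 0, then shifted by the head's length (alternative decomposition; return-value equivalence, no mutation).

-- ===== PORT A =====
-- state: (sentence_boundaries, begin_i, end_i)
def get_sentence_boundaries (sentences_conll : List (List Int)) : List (Int × Int) :=
  (sentences_conll.foldl
    (fun (st : List (Int × Int) × Int × Int) sent_conll =>
      let n_tokens : Int := sent_conll.length
      let end_i := st.2.1 + n_tokens - 1
      (st.1 ++ [(st.2.1, end_i)], end_i + 1, end_i))
    ([], 0, 0)).1

-- ===== PORT B =====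
-- if empty: []; else [(0, n-1)] + shifted recursive result on the tail
def get_sentence_boundaries_alt : List (List Int) → List (Int × Int)
  | [] => []
  | s :: rest =>
    let n : Int := s.length
    let r := get_sentence_boundaries_alt rest
    (0, n - 1) :: r.map (fun be => (be.1 + n, be.2 + n))

-- ===== PRECONDITION & SPEC =====
def Spec_get_sentence_boundaries (sentences_conll : List (List Int)) (out : List (Int × Int)) : Prop := out = get_sentence_boundaries_alt sentences_conll
instance (sentences_conll : List (List Int)) (out : List (Int × Int)) : Decidable (Spec_get_sentence_boundaries sentences_conll out) := by unfold Spec_get_sentence_boundaries; infer_instance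

-- ===== CLAIM =====
def Claim_equal_get_sentence_boundaries : Prop := ∀ (sentences_conll : List (List Int)), Dom_get_sentence_boundaries sentences_conll → Spec_get_sentence_boundaries sentences_conll (get_sentence_boundaries sentences_conll)

-- ===== LEMMAS AND PROOFS =====

-- the pairs produced from start offset b, as a direct recursion
def gsb_pairs (b : Int) : List (List Int) → List (Int × Int)
  | [] => []
  | s :: rest => (b, b + (s.length : Int) - 1) :: gsb_pairs (b + s.length) rest

theorem gsb_foldl_eq (xs : List (List Int)) (acc : List (Int × Int)) (b e : Int) :
    (xs.foldl
      (fun (st : List (Int × Int) × Int × Int) sent_conll =>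
        let n_tokens : Int := sent_conll.length
        let end_i := st.2.1 + n_tokens - 1
        (st.1 ++ [(st.2.1, end_i)], end_i + 1, end_i))
      (acc, b, e)).1 = acc ++ gsb_pairs b xs := by
  induction xs generalizing acc b e with
  | nil => simp [gsb_pairs]
  | cons s rest ih =>
    simp only [List.foldl_cons, gsb_pairs]
    rw [ih]
    simp

theorem gsb_alt_shift (xs : List (List Int)) (c : Int) :
    (get_sentence_boundaries_alt xs).map (fun be => (be.1 + c, be.2 + c)) = gsb_pairs c xs := by
  induction xs generalizing c with
  | nil => simp [get_sentence_boundaries_alt, gsb_pairs]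
  | cons s rest ih =>
    simp only [get_sentence_boundaries_alt, gsb_pairs, List.map_cons, List.map_map]
    rw [show c + ((s.length : ℕ) : Int) = ((s.length : ℕ) : Int) + c from add_comm _ _]
    rw [← ih (((s.length : ℕ) : Int) + c)]
    congr 1
    · simp only [Prod.mk.injEq]
      constructor <;> ring
    · congr 1
      funext be
      simp only [Function.comp, Prod.mk.injEq]
      constructor <;> ring

theorem gsb_alt_eq_pairs (xs : List (List Int)) :
    get_sentence_boundaries_alt xs = gsb_pairs 0 xs := by
  have h := gsb_alt_shift xs 0
  simpa using h

-- ===== VERDICT =====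
theorem get_sentence_boundaries_spec : Claim_equal_get_sentence_boundaries := by
  intro xs _
  unfold Spec_get_sentence_boundaries get_sentence_boundaries
  rw [gsb_foldl_eq, gsb_alt_eq_pairs]
  simp
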